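-- pv_equiv track=rewrite | github.com/SebaJoe/MultiCochrane | code/anno_viewer/make-alignment-file/json_to_csv.py | create_pt
-- ===== SOURCE A (Python) =====
-- def plen(transformer, p):
--     c = 0
--     for para, sent in transformer:
--         if para == p:
--             c += 1
--     return c
--
-- def create_pt(plist, transformer):
--     pt = []
--     pt2 = []
--     for p in plist:
--         length = plen(transformer, p)
--         pt.extend(range(length))
--         pt2.extend([p]*length)
--     return pt, pt2
-- ===== SOURCE B (Python) =====
-- def _bisect(keys, p, right):
--     # classic binary search on the sorted key list: rightmost/leftmost
--     # insertion point for p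
--     lo, hi = 0, len(keys)
--     while lo < hi:
--         mid = (lo + hi) // 2
--         if keys[mid] < p or (right and keys[mid] == p):
--             lo = mid + 1
--         else:
--             hi = mid
--     return lo
--
-- def create_pt(plist, transformer):
--     # sort the paragraph keys once, then get each paragraph's occurrence
--     # count as the width of its equal-range, found by binary search
--     keys = sorted(para for para, _ in transformer)
--     pt = []
--     pt2 = []
--     for p in plist:
--         n = _bisect(keys, p, True) - _bisect(keys, p, False)
--         pt.extend(range(n))
--         pt2.extend([p] * n)
--     return pt, pt2
-- ===== Notes on version B (the rewrite author's own statement) =====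
-- stated objective: faster
-- what changed: B sorts the paragraph keys once and obtains each paragraph's occurrence count as the width of its equal-range via two hand-written binary searches, instead of A's linear rescan of transformer (helper plen) for every element of plist.
import Mathlib
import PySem

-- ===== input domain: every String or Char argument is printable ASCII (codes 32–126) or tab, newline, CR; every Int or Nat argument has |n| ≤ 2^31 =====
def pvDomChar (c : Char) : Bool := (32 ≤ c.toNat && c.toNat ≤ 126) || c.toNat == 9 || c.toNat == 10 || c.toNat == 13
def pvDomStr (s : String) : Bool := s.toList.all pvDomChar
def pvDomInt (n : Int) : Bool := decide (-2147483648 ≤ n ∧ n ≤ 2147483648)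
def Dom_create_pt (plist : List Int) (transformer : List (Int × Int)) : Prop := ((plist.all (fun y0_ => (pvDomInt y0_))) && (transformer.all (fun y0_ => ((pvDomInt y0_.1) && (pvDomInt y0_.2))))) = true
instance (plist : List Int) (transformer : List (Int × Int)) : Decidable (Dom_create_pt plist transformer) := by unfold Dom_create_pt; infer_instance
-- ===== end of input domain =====

-- B sorts the paragraph keys once and reads each paragraph's occurrence count off the
-- sorted list as the width of its equal-range, found by binary search, replacing A's
-- linear rescan of transformer (plen) for every element of plist (objective: faster).

-- ===== PORT A =====
-- plen: count pairs of transformer whose first component equals p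
def plen (transformer : List (Int × Int)) (p : Int) : Int :=
  transformer.foldl (fun c q => if q.1 == p then c + 1 else c) 0

def create_pt (plist : List Int) (transformer : List (Int × Int)) : List Int × List Int :=
  plist.foldl (fun acc p =>
    let length := plen transformer p
    (acc.1 ++ PySem.List.pyRange 0 length 1, acc.2 ++ List.replicate length.toNat p))
    ([], [])

-- ===== PORT B =====
-- _bisect: the while loop becomes recursion on hi - lo; keys[mid] is in range on every
-- call (0 ≤ lo ≤ mid < hi ≤ len keys), so getD with default 0 is exact here
def pyBisect (keys : List Int) (p : Int) (right : Bool) (lo hi : Nat) : Nat :=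
  if lo < hi then
    let mid := (lo + hi) / 2
    if keys.getD mid 0 < p ∨ (right = true ∧ keys.getD mid 0 = p) then
      pyBisect keys p right (mid + 1) hi
    else
      pyBisect keys p right lo mid
  else lo
termination_by hi - lo
decreasing_by all_goals omega

def create_pt_alt (plist : List Int) (transformer : List (Int × Int)) : List Int × List Int :=
  let keys := PySem.List.sorted (transformer.map (fun q => q.1)) id false
  plist.foldl (fun acc p =>
    let n : Int := (pyBisect keys p true 0 keys.length : Int)
                 - (pyBisect keys p false 0 keys.length : Int)
    (acc.1 ++ PySem.List.pyRange 0 n 1, acc.2 ++ List.replicate n.toNat p))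
    ([], [])

-- ===== PRECONDITION & SPEC =====
def Spec_create_pt (plist : List Int) (transformer : List (Int × Int)) (out : List Int × List Int) : Prop := out = create_pt_alt plist transformer
instance (plist : List Int) (transformer : List (Int × Int)) (out : List Int × List Int) : Decidable (Spec_create_pt plist transformer out) := by unfold Spec_create_pt; infer_instance

-- ===== CLAIM =====
def Claim_equal_create_pt : Prop := ∀ (plist : List Int) (transformer : List (Int × Int)), Dom_create_pt plist transformer → Spec_create_pt plist transformer (create_pt plist transformer)

-- ===== LEMMAS AND PROOFS =====

-- a predicate true exactly on the first k positions counts to k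
theorem countP_threshold (l : List Int) (q : Int → Bool) (k : Nat) (hk : k ≤ l.length)
    (h1 : ∀ i (h : i < l.length), i < k → q l[i] = true)
    (h2 : ∀ i (h : i < l.length), k ≤ i → q l[i] = false) :
    l.countP q = k := by
  rw [← List.take_append_drop k l, List.countP_append]
  have ht : (l.take k).countP q = (l.take k).length := by
    rw [List.countP_eq_length]
    intro a ha
    obtain ⟨i, hi, rfl⟩ := List.getElem_of_mem ha
    have hik : i < k := lt_of_lt_of_le hi (by simp)
    have hil : i < l.length := lt_of_lt_of_le hik hk
    rw [List.getElem_take]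
    exact h1 i hil hik
  have hd : (l.drop k).countP q = 0 := by
    rw [List.countP_eq_zero]
    intro a ha
    obtain ⟨i, hi, rfl⟩ := List.getElem_of_mem ha
    rw [List.getElem_drop]
    simp only [List.length_drop] at hi
    exact (h2 (k + i) (by omega) (by omega)) ▸ (by simp [h2 (k + i) (by omega) (by omega)])
  rw [ht, hd, List.length_take]
  omega

-- binary-search invariant: on a sorted list, with the condition already decided left of
-- lo and refuted from hi on, pyBisect returns the count of elements satisfying it
theorem pyBisect_eq (keys : List Int) (p : Int) (right : Bool)
    (hs : List.Pairwise (· ≤ ·) keys) :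
    ∀ n lo hi, hi - lo ≤ n → lo ≤ hi → hi ≤ keys.length →
    (∀ i (h : i < keys.length), i < lo →
      (decide (keys[i] < p ∨ (right = true ∧ keys[i] = p)) = true)) →
    (∀ i (h : i < keys.length), hi ≤ i →
      (decide (keys[i] < p ∨ (right = true ∧ keys[i] = p)) = false)) →
    pyBisect keys p right lo hi
      = keys.countP (fun x => decide (x < p ∨ (right = true ∧ x = p))) := by
  have hmono := List.pairwise_iff_getElem.mp hs
  intro n
  induction n with
  | zero =>
    intro lo hi hn hle hhi h1 h2
    have : lo = hi := by omega
    subst this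
    rw [pyBisect]
    simp only [lt_irrefl, if_false]
    exact (countP_threshold keys _ lo (by omega) h1 h2).symm
  | succ n ih =>
    intro lo hi hn hle hhi h1 h2
    rw [pyBisect]
    by_cases hlt : lo < hi
    · simp only [hlt, if_true]
      have hmidlt : (lo + hi) / 2 < keys.length := by omega
      have hgd : keys.getD ((lo + hi) / 2) 0 = keys[(lo + hi) / 2] :=
        List.getD_eq_getElem keys 0 hmidlt
      by_cases hc : keys.getD ((lo + hi) / 2) 0 < p ∨ (right = true ∧ keys.getD ((lo + hi) / 2) 0 = p)
      · simp only [hc, if_true]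
        refine ih ((lo + hi) / 2 + 1) hi (by omega) (by omega) hhi ?_ h2
        intro i hil hi'
        rw [decide_eq_true_eq]
        rw [hgd] at hc
        rcases Nat.lt_or_ge i ((lo + hi) / 2) with hi2 | hi2
        · have hle' : keys[i] ≤ keys[(lo + hi) / 2] := hmono i ((lo + hi) / 2) hil hmidlt hi2
          rcases hc with hc | ⟨hr, hc⟩
          · exact Or.inl (lt_of_le_of_lt hle' hc)
          · rcases lt_or_eq_of_le (hc ▸ hle') with h | h
            · exact Or.inl h
            · exact Or.inr ⟨hr, h⟩
        · have : i = (lo + hi) / 2 := by omega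
          subst this
          exact hc
      · simp only [hc, if_false]
        refine ih lo ((lo + hi) / 2) (by omega) (by omega) (by omega) h1 ?_
        intro i hil hi'
        rw [decide_eq_false_iff_not]
        rw [hgd] at hc
        intro habs
        apply hc
        have hle' : keys[(lo + hi) / 2] ≤ keys[i] := by
          rcases Nat.lt_or_ge ((lo + hi) / 2) i with h | h
          · exact hmono ((lo + hi) / 2) i hmidlt hil h
          · have h' : (lo + hi) / 2 = i := by omega
            subst h'
            exact le_refl _
        rcases habs with h | ⟨hr, h⟩
        · exact Or.inl (lt_of_le_of_lt hle' h)
        · rcases lt_or_eq_of_le (h ▸ hle') with h' | h'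
          · exact Or.inl h'
          · exact Or.inr ⟨hr, h'⟩
    · rw [if_neg hlt]
      exact (countP_threshold keys _ lo (by omega) h1
        (fun i h hi2 => h2 i h (by omega))).symm

theorem countP_or_disjoint {α : Type} (l : List α) (f g : α → Bool)
    (h : ∀ a, ¬(f a = true ∧ g a = true)) :
    l.countP (fun x => f x || g x) = l.countP f + l.countP g := by
  induction l with
  | nil => rfl
  | cons a l ih =>
    simp only [List.countP_cons, ih]
    cases hf : f a <;> cases hg : g a
    · simp [hf, hg]
    · simp [hf, hg]
      omega
    · simp [hf, hg]
      omega
    · exact absurd ⟨hf, hg⟩ (h a)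

theorem countP_le_split (l : List Int) (p : Int) :
    l.countP (fun x => decide (x < p ∨ (true = true ∧ x = p)))
      = l.countP (fun x => decide (x < p ∨ (false = true ∧ x = p)))
        + l.countP (fun x => x == p) := by
  rw [List.countP_congr (q := fun x =>
      (fun x => decide (x < p ∨ (false = true ∧ x = p))) x || (fun x : Int => x == p) x) ?_]
  · exact countP_or_disjoint l _ _ (by intro a; simp; omega)
  · intro a _
    by_cases h1 : a < p <;> by_cases h2 : a = p <;> simp [h1, h2]

-- width of the equal-range on the sorted key list = plen on transformer
theorem bisect_diff_eq_plen (transformer : List (Int × Int)) (p : Int) :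
    ((pyBisect (PySem.List.sorted (transformer.map (fun q => q.1)) id false) p true 0
        (PySem.List.sorted (transformer.map (fun q => q.1)) id false).length : Int)
      - (pyBisect (PySem.List.sorted (transformer.map (fun q => q.1)) id false) p false 0
        (PySem.List.sorted (transformer.map (fun q => q.1)) id false).length : Int))
      = plen transformer p := by
  set keys := PySem.List.sorted (transformer.map (fun q => q.1)) id false with hkeys
  have hs : List.Pairwise (· ≤ ·) keys := by
    have := PySem.List.sorted_map_key_pairwise (transformer.map (fun q => q.1)) id
    simpa using this
  have hR := pyBisect_eq keys p true hs (keys.length) 0 keys.length (by omega) (by omega)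
    (le_refl _) (by intro i h hi; omega) (by intro i h hi; omega)
  have hL := pyBisect_eq keys p false hs (keys.length) 0 keys.length (by omega) (by omega)
    (le_refl _) (by intro i h hi; omega) (by intro i h hi; omega)
  have hperm : keys.Perm (transformer.map (fun q => q.1)) :=
    PySem.List.sorted_perm _ _ _
  have hcount : keys.countP (fun x => x == p)
      = transformer.countP (fun q => q.1 == p) := by
    rw [hperm.countP_eq, List.countP_map]
    rfl
  have hplen : plen transformer p = (transformer.countP (fun q => q.1 == p) : Int) := by
    rw [plen, PySem.List.foldl_count_if]; ring
  rw [hR, hL, hplen, ← hcount, countP_le_split]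
  push_cast
  ring

-- ===== VERDICT =====
theorem create_pt_spec : Claim_equal_create_pt := by
  intro plist transformer _
  unfold Spec_create_pt create_pt create_pt_alt
  have hstep : (fun (acc : List Int × List Int) p =>
      let length := plen transformer p
      (acc.1 ++ PySem.List.pyRange 0 length 1, acc.2 ++ List.replicate length.toNat p))
    = (fun (acc : List Int × List Int) p =>
      let n : Int := (pyBisect (PySem.List.sorted (transformer.map (fun q => q.1)) id false)
            p true 0 (PySem.List.sorted (transformer.map (fun q => q.1)) id false).length : Int)
          - (pyBisect (PySem.List.sorted (transformer.map (fun q => q.1)) id false)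
            p false 0 (PySem.List.sorted (transformer.map (fun q => q.1)) id false).length : Int)
      (acc.1 ++ PySem.List.pyRange 0 n 1, acc.2 ++ List.replicate n.toNat p)) := by
    funext acc p
    simp only [bisect_diff_eq_plen]
  rw [hstep]
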